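-- pv_equiv track=rewrite | github.com/raul4nt/proj-dell-loteria | main.py | ordenar_vencedores_por_nome
-- ===== SOURCE A (Python) =====
-- usuarios_cadastrados = [
--     {'id': 1, 'nome': 'Raul', 'cpf': '0', 'senha': '0', 'admin': True},
--     #Coloquei assim pra testar mais rápido as funções de admin
--     {'id': 2, 'nome': 'João', 'cpf': '2', 'senha': '2'},
--     #Coloquei assim pra testar mais rápido as funções de usuário
--     {'id': 3, 'nome': 'Maria', 'cpf': '04953933044', 'senha': 'atcpatcpi'},
--     {'id': 4, 'nome': 'Ana', 'cpf': '95274808093', 'senha': '123aninha'},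
--     {'id': 5, 'nome': 'Pedro', 'cpf': '25462791062', 'senha': 'aleeeluia'},
--     {'id': 6, 'nome': 'Fernanda', 'cpf': '01058513028', 'senha': 'senhapassword'},
--     {'id': 7, 'nome': 'Carlos', 'cpf': '60630794081', 'senha': 'saladafrutas321'},
--     {'id': 8, 'nome': 'Mariana', 'cpf': '68893223040', 'senha': 'windowsxphaha'},
--     {'id': 9, 'nome': 'Gabriel', 'cpf': '25392436064', 'senha': '1', 'admin': True},
--     {'id': 10, 'nome': 'Juliana', 'cpf': '34949156012', 'senha': 'apple444'},
--     {'id': 11, 'nome': 'Lucas', 'cpf': '33657401040', 'senha': 'campominado'},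
--     {'id': 12, 'nome': 'Aline', 'cpf': '60218425023', 'senha': '9876543dois'},
--     {'id': 13, 'nome': 'Rafael', 'cpf': '90021095043', 'senha': 'senhasenha'},
--     {'id': 14, 'nome': 'Patricia', 'cpf': '88061785048', 'senha': 'cocada123'},
--     {'id': 15, 'nome': 'Roberto', 'cpf': '65794339063', 'senha': 'bemtevi333'}
--     #Dicionário com todos os usuarios cadastrados; possui id com autoincremento(realizado na função
-- # de cadastro), nome, cpf, senha e, se for admin, uma chave admin com um valor boolean True
-- ]
--
-- todas_as_apostas = [
--      {'id_apostador': 1, 'aposta': [2, 26, 33, 5, 9], 'id_aposta': 1000},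
--     {'id_apostador': 1, 'aposta': [2, 5, 1, 3, 4], 'id_aposta': 1001},
--     {'id_apostador': 2, 'aposta': [26, 33, 5, 9, 23], 'id_aposta': 1002},
--     {'id_apostador': 2, 'aposta': [30, 15, 19, 1, 2], 'id_aposta': 1003},
--     {'id_apostador': 3, 'aposta': [33, 5, 9, 23, 30], 'id_aposta': 1004},
--     {'id_apostador': 3, 'aposta': [3, 5, 2, 4, 1], 'id_aposta': 1005},
--     {'id_apostador': 4, 'aposta': [5, 9, 23, 30, 15], 'id_aposta': 1006},
--     {'id_apostador': 4, 'aposta': [19, 1, 2, 26, 33], 'id_aposta': 1007},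
--     {'id_apostador': 5, 'aposta': [9, 23, 30, 15, 19], 'id_aposta': 1008},
--     {'id_apostador': 6, 'aposta': [2, 3, 5, 10, 15], 'id_aposta': 1009},
--     {'id_apostador': 6, 'aposta': [7, 12, 18, 25, 32], 'id_aposta': 1010},
--     {'id_apostador': 6, 'aposta': [1, 7, 11, 20, 28], 'id_aposta': 1011},
--     {'id_apostador': 6, 'aposta': [8, 15, 17, 21, 35], 'id_aposta': 1012},
--     {'id_apostador': 11, 'aposta': [2, 9, 16, 22, 45], 'id_aposta': 1013},
--     {'id_apostador': 12, 'aposta': [10, 20, 25, 30, 40], 'id_aposta': 1014},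
--     {'id_apostador': 12, 'aposta': [3, 6, 9, 18, 27], 'id_aposta': 1015},
--     {'id_apostador': 13, 'aposta': [1, 10, 19, 26, 33], 'id_aposta': 1016},
--     {'id_apostador': 15, 'aposta': [11, 21, 31, 41, 50], 'id_aposta': 1017},
--     {'id_apostador': 15, 'aposta': [4, 13, 24, 36, 49], 'id_aposta': 1018}
--     #Dicionário com todas as apostas já feitas: possui id_aposta com autoincremento(realizado na função de registrar
--  # aposta), a aposta que o usuário fez(seja ela surpresa ou tradicional) e o id do apostador correspondente(aquele que fez
-- # a aposta). Isso tudo feito de maneira automática na função de registro.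
-- ]
--
-- def ordenar_vencedores_por_nome(apostas_vencedoras):
--     info_vencedores = []
--     for id_aposta in apostas_vencedoras:
--         for aposta in todas_as_apostas:
--             if aposta['id_aposta'] == id_aposta:
--                 id_apostador = aposta['id_apostador']
--                 for usuario in usuarios_cadastrados:
--                     if usuario['id'] == id_apostador:
--                         info_vencedores.append((usuario['nome'], aposta['aposta'], id_aposta))
--                         break
--                 break
--     return sorted(info_vencedores, key=lambda x: x[0])
-- ===== SOURCE B (Python) =====
-- usuarios_cadastrados = [
--     {'id': 1, 'nome': 'Raul', 'cpf': '0', 'senha': '0', 'admin': True},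
--     {'id': 2, 'nome': 'João', 'cpf': '2', 'senha': '2'},
--     {'id': 3, 'nome': 'Maria', 'cpf': '04953933044', 'senha': 'atcpatcpi'},
--     {'id': 4, 'nome': 'Ana', 'cpf': '95274808093', 'senha': '123aninha'},
--     {'id': 5, 'nome': 'Pedro', 'cpf': '25462791062', 'senha': 'aleeeluia'},
--     {'id': 6, 'nome': 'Fernanda', 'cpf': '01058513028', 'senha': 'senhapassword'},
--     {'id': 7, 'nome': 'Carlos', 'cpf': '60630794081', 'senha': 'saladafrutas321'},
--     {'id': 8, 'nome': 'Mariana', 'cpf': '68893223040', 'senha': 'windowsxphaha'},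
--     {'id': 9, 'nome': 'Gabriel', 'cpf': '25392436064', 'senha': '1', 'admin': True},
--     {'id': 10, 'nome': 'Juliana', 'cpf': '34949156012', 'senha': 'apple444'},
--     {'id': 11, 'nome': 'Lucas', 'cpf': '33657401040', 'senha': 'campominado'},
--     {'id': 12, 'nome': 'Aline', 'cpf': '60218425023', 'senha': '9876543dois'},
--     {'id': 13, 'nome': 'Rafael', 'cpf': '90021095043', 'senha': 'senhasenha'},
--     {'id': 14, 'nome': 'Patricia', 'cpf': '88061785048', 'senha': 'cocada123'},
--     {'id': 15, 'nome': 'Roberto', 'cpf': '65794339063', 'senha': 'bemtevi333'}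
-- ]
--
-- todas_as_apostas = [
--     {'id_apostador': 1, 'aposta': [2, 26, 33, 5, 9], 'id_aposta': 1000},
--     {'id_apostador': 1, 'aposta': [2, 5, 1, 3, 4], 'id_aposta': 1001},
--     {'id_apostador': 2, 'aposta': [26, 33, 5, 9, 23], 'id_aposta': 1002},
--     {'id_apostador': 2, 'aposta': [30, 15, 19, 1, 2], 'id_aposta': 1003},
--     {'id_apostador': 3, 'aposta': [33, 5, 9, 23, 30], 'id_aposta': 1004},
--     {'id_apostador': 3, 'aposta': [3, 5, 2, 4, 1], 'id_aposta': 1005},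
--     {'id_apostador': 4, 'aposta': [5, 9, 23, 30, 15], 'id_aposta': 1006},
--     {'id_apostador': 4, 'aposta': [19, 1, 2, 26, 33], 'id_aposta': 1007},
--     {'id_apostador': 5, 'aposta': [9, 23, 30, 15, 19], 'id_aposta': 1008},
--     {'id_apostador': 6, 'aposta': [2, 3, 5, 10, 15], 'id_aposta': 1009},
--     {'id_apostador': 6, 'aposta': [7, 12, 18, 25, 32], 'id_aposta': 1010},
--     {'id_apostador': 6, 'aposta': [1, 7, 11, 20, 28], 'id_aposta': 1011},
--     {'id_apostador': 6, 'aposta': [8, 15, 17, 21, 35], 'id_aposta': 1012},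
--     {'id_apostador': 11, 'aposta': [2, 9, 16, 22, 45], 'id_aposta': 1013},
--     {'id_apostador': 12, 'aposta': [10, 20, 25, 30, 40], 'id_aposta': 1014},
--     {'id_apostador': 12, 'aposta': [3, 6, 9, 18, 27], 'id_aposta': 1015},
--     {'id_apostador': 13, 'aposta': [1, 10, 19, 26, 33], 'id_aposta': 1016},
--     {'id_apostador': 15, 'aposta': [11, 21, 31, 41, 50], 'id_aposta': 1017},
--     {'id_apostador': 15, 'aposta': [4, 13, 24, 36, 49], 'id_aposta': 1018}
-- ]
--
-- # One-time indexes over the fixed module tables, and the user names in sorted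
-- # order.  Sorting the OUTPUT then becomes a bucket pass: group winners by name,
-- # emit buckets in precomputed name order (no comparison sort of the result).
-- _BETS = {a['id_aposta']: (a['id_apostador'], a['aposta']) for a in todas_as_apostas}
-- _NAMES = {u['id']: u['nome'] for u in usuarios_cadastrados}
-- _SORTED_NAMES = sorted({u['nome'] for u in usuarios_cadastrados})
--
-- def ordenar_vencedores_por_nome(apostas_vencedoras):
--     buckets = {}
--     for id_aposta in apostas_vencedoras:
--         bet = _BETS.get(id_aposta)
--         if bet is None:
--             continue
--         nome = _NAMES.get(bet[0])
--         if nome is None: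
--             continue
--         buckets.setdefault(nome, []).append((nome, bet[1], id_aposta))
--     out = []
--     for nome in _SORTED_NAMES:
--         out.extend(buckets.get(nome, []))
--     return out
-- ===== Notes on version B (the rewrite author's own statement) =====
-- stated objective: faster
-- what changed: B resolves each winning bet by O(1) dict lookups into indexes built once instead of A's per-bet linear scans of both tables, and replaces the final comparison sort by a bucket pass: winners are grouped by name and the buckets are emitted in the precomputed sorted order of the fixed user-name table, which equals A's stable sort by name.
import Mathlib
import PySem

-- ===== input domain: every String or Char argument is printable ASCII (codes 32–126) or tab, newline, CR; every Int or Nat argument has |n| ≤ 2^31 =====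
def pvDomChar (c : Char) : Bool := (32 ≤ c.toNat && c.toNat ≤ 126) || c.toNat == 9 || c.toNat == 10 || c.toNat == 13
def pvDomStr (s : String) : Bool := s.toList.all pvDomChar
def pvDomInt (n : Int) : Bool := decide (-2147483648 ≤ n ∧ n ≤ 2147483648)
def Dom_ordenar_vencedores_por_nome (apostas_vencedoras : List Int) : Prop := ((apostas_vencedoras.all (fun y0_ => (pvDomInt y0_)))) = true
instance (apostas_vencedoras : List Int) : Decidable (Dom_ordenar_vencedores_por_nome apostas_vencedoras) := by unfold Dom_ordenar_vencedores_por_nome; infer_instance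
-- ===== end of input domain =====

-- B replaces A's per-bet linear scans by one-time dict indexes and A's final comparison
-- sort by a bucket pass over the precomputed sorted user names; objective: faster (measured).

-- shared module data: each usuario as (id, nome), each aposta as (id_apostador, aposta, id_aposta)
def pvUsuarios : List (Int × String) :=
  [(1, "Raul"), (2, "João"), (3, "Maria"), (4, "Ana"), (5, "Pedro"),
   (6, "Fernanda"), (7, "Carlos"), (8, "Mariana"), (9, "Gabriel"), (10, "Juliana"),
   (11, "Lucas"), (12, "Aline"), (13, "Rafael"), (14, "Patricia"), (15, "Roberto")]

def pvTodasApostas : List (Int × List Int × Int) :=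
  [(1, [2, 26, 33, 5, 9], 1000), (1, [2, 5, 1, 3, 4], 1001),
   (2, [26, 33, 5, 9, 23], 1002), (2, [30, 15, 19, 1, 2], 1003),
   (3, [33, 5, 9, 23, 30], 1004), (3, [3, 5, 2, 4, 1], 1005),
   (4, [5, 9, 23, 30, 15], 1006), (4, [19, 1, 2, 26, 33], 1007),
   (5, [9, 23, 30, 15, 19], 1008), (6, [2, 3, 5, 10, 15], 1009),
   (6, [7, 12, 18, 25, 32], 1010), (6, [1, 7, 11, 20, 28], 1011),
   (6, [8, 15, 17, 21, 35], 1012), (11, [2, 9, 16, 22, 45], 1013),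
   (12, [10, 20, 25, 30, 40], 1014), (12, [3, 6, 9, 18, 27], 1015),
   (13, [1, 10, 19, 26, 33], 1016), (15, [11, 21, 31, 41, 50], 1017),
   (15, [4, 13, 24, 36, 49], 1018)]

-- ===== PORT A =====
-- A's inner 'for aposta in todas_as_apostas: if …: …; break' = first-match scan
def pvFindBetA : List (Int × List Int × Int) → Int → Option (Int × List Int)
  | [], _ => none
  | (uid, ap, ida) :: rest, i => if ida == i then some (uid, ap) else pvFindBetA rest i

-- A's inner 'for usuario in usuarios_cadastrados: if …: …; break'
def pvFindUserA : List (Int × String) → Int → Option String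
  | [], _ => none
  | (uid, nome) :: rest, i => if uid == i then some nome else pvFindUserA rest i

def pvStepA (acc : List (String × List Int × Int)) (id_aposta : Int) :
    List (String × List Int × Int) :=
  match pvFindBetA pvTodasApostas id_aposta with
  | none => acc
  | some (id_apostador, aposta) =>
    match pvFindUserA pvUsuarios id_apostador with
    | none => acc
    | some nome => acc ++ [(nome, aposta, id_aposta)]

def ordenar_vencedores_por_nome (apostas_vencedoras : List Int) :
    List (String × List Int × Int) :=
  PySem.List.sorted (apostas_vencedoras.foldl pvStepA []) (fun x => x.1) false

-- ===== PORT B =====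
-- one-time indexes (Python dict comprehensions over the module tables)
def pvBetsDict : PySem.Dict Int (Int × List Int) :=
  pvTodasApostas.foldl (fun d r => d.insert r.2.2 (r.1, r.2.1)) PySem.Dict.empty

def pvNamesDict : PySem.Dict Int String :=
  pvUsuarios.foldl (fun d r => d.insert r.1 r.2) PySem.Dict.empty

-- _SORTED_NAMES = sorted({u['nome'] for u in usuarios_cadastrados})
def pvSortedNames : List String :=
  PySem.List.sorted (PySem.Set.ofList (pvUsuarios.map (fun r => r.2))) (fun x => x) false

-- the loop body: buckets.setdefault(nome, []).append((nome, bet[1], id_aposta))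
def pvBucketStep (d : PySem.Dict String (List (String × List Int × Int))) (id_aposta : Int) :
    PySem.Dict String (List (String × List Int × Int)) :=
  match pvBetsDict.get? id_aposta with
  | none => d
  | some (id_apostador, aposta) =>
    match pvNamesDict.get? id_apostador with
    | none => d
    | some nome => d.insert nome (d.getD nome [] ++ [(nome, aposta, id_aposta)])

def ordenar_vencedores_por_nome_alt (apostas_vencedoras : List Int) :
    List (String × List Int × Int) :=
  let buckets := apostas_vencedoras.foldl pvBucketStep PySem.Dict.empty
  pvSortedNames.foldl (fun out nome => out ++ buckets.getD nome []) []

-- ===== PRECONDITION & SPEC =====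
def Spec_ordenar_vencedores_por_nome (apostas_vencedoras : List Int) (out : List (String × List Int × Int)) : Prop := out = ordenar_vencedores_por_nome_alt apostas_vencedoras
instance (apostas_vencedoras : List Int) (out : List (String × List Int × Int)) : Decidable (Spec_ordenar_vencedores_por_nome apostas_vencedoras out) := by unfold Spec_ordenar_vencedores_por_nome; infer_instance

-- ===== CLAIM =====
def Claim_equal_ordenar_vencedores_por_nome : Prop := ∀ (apostas_vencedoras : List Int), Dom_ordenar_vencedores_por_nome apostas_vencedoras → Spec_ordenar_vencedores_por_nome apostas_vencedoras (ordenar_vencedores_por_nome apostas_vencedoras)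

-- ===== LEMMAS AND PROOFS =====

-- the joined list A sorts, computed with B's dict indexes
def pvStepB (acc : List (String × List Int × Int)) (id_aposta : Int) :
    List (String × List Int × Int) :=
  match pvBetsDict.get? id_aposta with
  | none => acc
  | some (id_apostador, aposta) =>
    match pvNamesDict.get? id_apostador with
    | none => acc
    | some nome => acc ++ [(nome, aposta, id_aposta)]

-- equation lemmas for the two step functions
theorem pvStepB_skip1 (acc : List (String × List Int × Int)) (i : Int)
    (hb : pvBetsDict.get? i = none) : pvStepB acc i = acc := by
  simp [pvStepB, hb]

theorem pvStepB_skip2 (acc : List (String × List Int × Int)) (i : Int) (uid : Int)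
    (ap : List Int) (hb : pvBetsDict.get? i = some (uid, ap))
    (hn : pvNamesDict.get? uid = none) : pvStepB acc i = acc := by
  simp [pvStepB, hb, hn]

theorem pvStepB_app (acc : List (String × List Int × Int)) (i : Int) (uid : Int)
    (ap : List Int) (nome : String) (hb : pvBetsDict.get? i = some (uid, ap))
    (hn : pvNamesDict.get? uid = some nome) :
    pvStepB acc i = acc ++ [(nome, ap, i)] := by
  simp [pvStepB, hb, hn]

theorem pvBucketStep_skip1 (d : PySem.Dict String (List (String × List Int × Int))) (i : Int)
    (hb : pvBetsDict.get? i = none) : pvBucketStep d i = d := by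
  simp [pvBucketStep, hb]

theorem pvBucketStep_skip2 (d : PySem.Dict String (List (String × List Int × Int))) (i : Int)
    (uid : Int) (ap : List Int) (hb : pvBetsDict.get? i = some (uid, ap))
    (hn : pvNamesDict.get? uid = none) : pvBucketStep d i = d := by
  simp [pvBucketStep, hb, hn]

theorem pvBucketStep_app (d : PySem.Dict String (List (String × List Int × Int))) (i : Int)
    (uid : Int) (ap : List Int) (nome : String) (hb : pvBetsDict.get? i = some (uid, ap))
    (hn : pvNamesDict.get? uid = some nome) :
    pvBucketStep d i = d.insert nome (d.getD nome [] ++ [(nome, ap, i)]) := by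
  simp [pvBucketStep, hb, hn]

-- A's first-match scans, rephrased as List.find?
theorem pvFindBetA_find? (l : List (Int × List Int × Int)) (i : Int) :
    pvFindBetA l i = Option.map (fun r => (r.1, r.2.1)) (l.find? (fun r => r.2.2 == i)) := by
  induction l with
  | nil => rfl
  | cons hd tl ih =>
    obtain ⟨uid, ap, ida⟩ := hd
    by_cases h : ida = i <;> simp [pvFindBetA, h, ih]

theorem pvFindUserA_find? (l : List (Int × String)) (i : Int) :
    pvFindUserA l i = Option.map (fun r => r.2) (l.find? (fun r => r.1 == i)) := by
  induction l with
  | nil => rfl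
  | cons hd tl ih =>
    obtain ⟨uid, nome⟩ := hd
    by_cases h : uid = i <;> simp [pvFindUserA, h, ih]

-- the dict indexes look up exactly what A's first-match scans find (the table keys are distinct)
theorem pvBets_eq (i : Int) : pvBetsDict.get? i = pvFindBetA pvTodasApostas i := by
  have hd : pvBetsDict =
      PySem.Dict.mk (pvTodasApostas.map (fun r => (r.2.2, (r.1, r.2.1)))) := by decide
  rw [hd, pvFindBetA_find?]
  simp only [PySem.Dict.get?, List.find?_map, Option.map_map]
  rfl

theorem pvNames_eq (i : Int) : pvNamesDict.get? i = pvFindUserA pvUsuarios i := by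
  have hd : pvNamesDict = PySem.Dict.mk pvUsuarios := by decide
  rw [hd, pvFindUserA_find?]
  rfl

theorem pvStep_eq : pvStepA = pvStepB := by
  funext acc i
  simp only [pvStepA, pvStepB, pvBets_eq, pvNames_eq]

-- every entry of the joined list carries a name from the sorted-name table
theorem pvStepB_names (acc : List (String × List Int × Int)) (ids : List Int)
    (h : ∀ x ∈ acc, x.1 ∈ pvSortedNames) :
    ∀ x ∈ ids.foldl pvStepB acc, x.1 ∈ pvSortedNames := by
  induction ids generalizing acc with
  | nil => exact h
  | cons i ids ih =>
    simp only [List.foldl_cons]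
    apply ih
    cases hb : pvBetsDict.get? i with
    | none => rw [pvStepB_skip1 _ _ hb]; exact h
    | some b =>
      obtain ⟨uid, ap⟩ := b
      cases hn : pvNamesDict.get? uid with
      | none => rw [pvStepB_skip2 _ _ _ _ hb hn]; exact h
      | some nome =>
        rw [pvStepB_app _ _ _ _ _ hb hn]
        intro x hx
        rcases List.mem_append.mp hx with hx | hx
        · exact h x hx
        · have hx1 : x = (nome, ap, i) := by simpa using hx
          subst hx1
          have hmem : nome ∈ pvUsuarios.map (fun r => r.2) := by
            rw [pvNames_eq, pvFindUserA_find?] at hn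
            rcases Option.map_eq_some_iff.mp hn with ⟨r, hr, hrn⟩
            exact hrn ▸ List.mem_map_of_mem (List.mem_of_find?_eq_some hr)
          simpa [pvSortedNames, PySem.List.mem_sorted, PySem.Set.mem_ofList] using hmem

-- insertBy helper facts
theorem pvInsertBy_append_left {α : Type} (before : α → α → Bool) (x : α) (u v : List α)
    (hu : ∀ y ∈ u, before x y = false) :
    PySem.List.insertBy before x (u ++ v) = u ++ PySem.List.insertBy before x v := by
  induction u with
  | nil => rfl
  | cons y u ih =>
    have hy : before x y = false := hu y (by simp)
    simp [PySem.List.insertBy, hy, ih (fun z hz => hu z (by simp [hz]))]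

theorem pvInsertBy_all_before {α : Type} (before : α → α → Bool) (x : α) (v : List α)
    (hv : ∀ y ∈ v, before x y = true) :
    PySem.List.insertBy before x v = x :: v := by
  cases v with
  | nil => rfl
  | cons y v => simp [PySem.List.insertBy, hv y (by simp)]

-- one stable insertion lands exactly at the end of its bucket
theorem pvInsert_bucket {α : Type} (key : α → String) (ns : List String)
    (hns : ns.Pairwise (· < ·)) (P : List α) (x : α) (hx : key x ∈ ns) :
    PySem.List.insertBy (fun a b => decide (key a < key b)) x
        (ns.flatMap (fun n => P.filter (fun y => key y == n)))
      = ns.flatMap (fun n => (P ++ [x]).filter (fun y => key y == n)) := by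
  induction ns with
  | nil => simp at hx
  | cons n ns ih =>
    have hlt : ∀ m ∈ ns, n < m := (List.pairwise_cons.mp hns).1
    have hns' : ns.Pairwise (· < ·) := (List.pairwise_cons.mp hns).2
    simp only [List.flatMap_cons, List.filter_append]
    by_cases hk : key x = n
    · -- x goes to the end of bucket n; no later bucket takes it
      have h1 : ∀ y ∈ P.filter (fun y => key y == n), (decide (key x < key y)) = false := by
        intro y hy
        have hyn : key y = n := by simpa using (List.of_mem_filter hy)
        rw [decide_eq_false_iff_not, hyn, hk]
        exact lt_irrefl n
      have h2 : ∀ y ∈ ns.flatMap (fun m => P.filter (fun z => key z == m)),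
          (decide (key x < key y)) = true := by
        intro y hy
        rcases List.mem_flatMap.mp hy with ⟨m, hm, hym⟩
        have hym' : key y = m := by simpa using (List.of_mem_filter hym)
        rw [decide_eq_true_eq, hym', hk]
        exact hlt m hm
      rw [pvInsertBy_append_left _ _ _ _ h1, pvInsertBy_all_before _ _ _ h2]
      have h4 : ns.flatMap (fun m => P.filter (fun z => key z == m) ++ [x].filter (fun z => key z == m))
          = ns.flatMap (fun m => P.filter (fun z => key z == m)) := by
        apply List.flatMap_congr
        intro m hm
        have hne : key x ≠ m := by rw [hk]; exact ne_of_lt (hlt m hm)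
        have hbe : (key x == m) = false := beq_eq_false_iff_ne.mpr hne
        simp [hbe]
      rw [h4]
      have hbn : (key x == n) = true := beq_iff_eq.mpr hk
      simp [hbn]
    · -- x belongs to a later bucket
      have hx' : key x ∈ ns := by
        rcases hx with _ | h
        · exact absurd rfl hk
        · assumption
      have hnx : n < key x := hlt _ hx'
      have h1 : ∀ y ∈ P.filter (fun y => key y == n), (decide (key x < key y)) = false := by
        intro y hy
        have hyn : key y = n := by simpa using (List.of_mem_filter hy)
        rw [decide_eq_false_iff_not, hyn]
        exact lt_asymm hnx
      rw [pvInsertBy_append_left _ _ _ _ h1, ih hns' hx']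
      have hbe : (key x == n) = false := beq_eq_false_iff_ne.mpr hk
      simp [hbe, List.filter_append]

-- stable sort = bucket concatenation over strictly increasing key list
theorem pvBucket_sorted {α : Type} (key : α → String) (ns : List String)
    (hns : ns.Pairwise (· < ·)) (M : List α) (hM : ∀ x ∈ M, key x ∈ ns) :
    ns.flatMap (fun n => M.filter (fun y => key y == n)) = PySem.List.sorted M key false := by
  rw [PySem.List.sorted_eq_foldl_insertBy]
  suffices h : ∀ (L P : List α), (∀ x ∈ L, key x ∈ ns) →
      L.foldl (fun acc x => PySem.List.insertBy (fun a b => decide (key a < key b)) x acc)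
        (ns.flatMap (fun n => P.filter (fun y => key y == n)))
      = ns.flatMap (fun n => (P ++ L).filter (fun y => key y == n)) by
    have h0 := h M [] hM
    simp only [List.filter_nil, List.nil_append] at h0
    have h1 : (ns.flatMap (fun _ => ([] : List α))) = [] := by simp
    rw [h1] at h0
    exact h0.symm
  intro L
  induction L with
  | nil => intro P _; simp
  | cons x L ih =>
    intro P hL
    simp only [List.foldl_cons]
    rw [pvInsert_bucket key ns hns P x (hL x (by simp)),
        ih (P ++ [x]) (fun z hz => hL z (by simp [hz]))]
    simp

-- the bucket dict contents = filters of the joined list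
theorem pvBuckets_filter (ids : List Int)
    (d : PySem.Dict String (List (String × List Int × Int)))
    (l : List (String × List Int × Int))
    (h : ∀ n, d.getD n [] = l.filter (fun y => y.1 == n)) :
    ∀ n, (ids.foldl pvBucketStep d).getD n []
        = (ids.foldl pvStepB l).filter (fun y => y.1 == n) := by
  induction ids generalizing d l with
  | nil => exact h
  | cons i ids ih =>
    simp only [List.foldl_cons]
    apply ih
    intro n
    cases hb : pvBetsDict.get? i with
    | none => rw [pvStepB_skip1 _ _ hb, pvBucketStep_skip1 _ _ hb]; exact h n
    | some b =>
      obtain ⟨uid, ap⟩ := b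
      cases hn : pvNamesDict.get? uid with
      | none => rw [pvStepB_skip2 _ _ _ _ hb hn, pvBucketStep_skip2 _ _ _ _ hb hn]; exact h n
      | some nome =>
        rw [pvStepB_app _ _ _ _ _ hb hn, pvBucketStep_app _ _ _ _ _ hb hn,
            PySem.Dict.getD_insert, List.filter_append]
        by_cases hnn : n = nome
        · subst hnn
          simp [h n]
        · have hbe : ((nome, ap, i).1 == n) = false :=
            beq_eq_false_iff_ne.mpr (fun h' => hnn h'.symm)
          simp [hnn, h n, hbe]

theorem pvSortedNames_pairwise : pvSortedNames.Pairwise (· < ·) :=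
  PySem.List.sorted_ofList_pairwise_lt _

-- ===== VERDICT =====
theorem ordenar_vencedores_por_nome_spec : Claim_equal_ordenar_vencedores_por_nome := by
  intro ids _
  show _ = _
  unfold ordenar_vencedores_por_nome ordenar_vencedores_por_nome_alt
  rw [pvStep_eq]
  rw [PySem.List.foldl_append_eq_flatMap]
  have hb : ∀ n, ((ids.foldl pvBucketStep PySem.Dict.empty).getD n [])
      = (ids.foldl pvStepB []).filter (fun y => y.1 == n) :=
    pvBuckets_filter ids PySem.Dict.empty [] (fun n => by rfl)
  have hflat : (pvSortedNames.flatMap fun nome =>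
        (ids.foldl pvBucketStep PySem.Dict.empty).getD nome [])
      = pvSortedNames.flatMap (fun n => (ids.foldl pvStepB []).filter (fun y => y.1 == n)) :=
    List.flatMap_congr (fun n _ => hb n)
  rw [show ([] : List (String × List Int × Int)) ++ _ = _ from List.nil_append _, hflat]
  exact (pvBucket_sorted (fun x : String × List Int × Int => x.1) pvSortedNames
    pvSortedNames_pairwise _ (pvStepB_names [] ids (by simp))).symm
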